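-- pv_equiv track=rewrite | github.com/Air2air/z-beam-generator | backups/properties_to_materialproperties_1758780179/components/frontmatter/ordering/field_ordering_service.py | _create_clean_properties_structure
-- ===== SOURCE A (Python) =====
-- from typing import Dict
--
-- def _create_clean_properties_structure(properties: Dict) -> Dict:
--     """Create clean properties structure with logical grouping and proper formatting"""
--     clean_properties = {}
--
--     # Property groups in logical order
--     property_groups = [
--         "density", "meltingPoint", "thermalConductivity",
--         "tensileStrength", "hardness", "youngsModulus"
--     ]
--
--     # Add each property group cleanly with proper spacing
--     for prop in property_groups:
--         if prop in properties:
--             clean_properties[prop] = properties[prop]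
--
--             # Add associated fields in order with proper separation
--             for suffix in ["Unit", "Range", "Percentile"]:
--                 field_name = f"{prop}{suffix}"
--                 if field_name in properties:
--                     clean_properties[field_name] = properties[field_name]
--
--     # Add any remaining properties
--     for key, value in properties.items():
--         if key not in clean_properties:
--             clean_properties[key] = value
--
--     return clean_properties
-- ===== SOURCE B (Python) =====
-- def _create_clean_properties_structure(properties):
--     """Priority-table + stable sort: rank the logically grouped keys, then one stable sort of items."""
--     ordered = []
--     for prop in ["density", "meltingPoint", "thermalConductivity",
--                  "tensileStrength", "hardness", "youngsModulus"]:
--         if prop in properties: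
--             ordered.append(prop)
--             for suffix in ["Unit", "Range", "Percentile"]:
--                 if prop + suffix in properties:
--                     ordered.append(prop + suffix)
--     priority = {key: i for i, key in enumerate(ordered)}
--     fallback = len(priority)
--     items = sorted(properties.items(), key=lambda kv: priority.get(kv[0], fallback))
--     return dict(items)
-- ===== Notes on version B (the rewrite author's own statement) =====
-- stated objective: alternative
-- what changed: A builds the result dict by a nested grouped-construction (insert each present group key and its Unit/Range/Percentile fields) followed by a leftover pass; B instead builds an ordered priority table once and produces the result by a single stable sort of the items keyed by that table, with a shared sentinel rank for unlisted keys.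
import Mathlib
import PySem

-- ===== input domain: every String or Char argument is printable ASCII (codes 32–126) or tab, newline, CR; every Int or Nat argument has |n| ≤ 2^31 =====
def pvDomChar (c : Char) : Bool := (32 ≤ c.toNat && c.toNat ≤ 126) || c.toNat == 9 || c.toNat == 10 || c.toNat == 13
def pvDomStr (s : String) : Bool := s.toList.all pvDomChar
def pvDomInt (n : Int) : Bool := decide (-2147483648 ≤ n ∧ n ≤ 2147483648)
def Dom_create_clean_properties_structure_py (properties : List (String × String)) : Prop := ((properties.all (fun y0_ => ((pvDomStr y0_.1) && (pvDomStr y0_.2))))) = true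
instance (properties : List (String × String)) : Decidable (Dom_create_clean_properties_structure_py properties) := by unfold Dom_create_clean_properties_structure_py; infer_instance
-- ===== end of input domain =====

-- B replaces A's nested grouped-construction plus leftover pass by a priority table and ONE stable
-- sort of the items (objective: alternative — a genuinely different algorithm of similar cost).

-- ===== PORT A =====
-- A iterates the property groups, inserting each present group key and its present
-- "Unit"/"Range"/"Percentile" fields into a fresh dict, then appends all remaining items.
def create_clean_properties_structure_py (properties : List (String × String)) : List (String × String) :=
  let P : PySem.Dict String String := PySem.Dict.mk properties
  let property_groups : List String :=
    ["density", "meltingPoint", "thermalConductivity", "tensileStrength", "hardness", "youngsModulus"]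
  -- for prop in property_groups: …
  let clean : PySem.Dict String String :=
    property_groups.foldl (fun clean prop =>
      if P.contains prop then
        -- clean_properties[prop] = properties[prop]  (the lookup is guarded by the contains check, so getD is exact)
        let clean := clean.insert prop (P.getD prop "")
        (["Unit", "Range", "Percentile"] : List String).foldl (fun clean suffix =>
          let field_name := prop ++ suffix
          if P.contains field_name then clean.insert field_name (P.getD field_name "") else clean) clean
      else clean) PySem.Dict.empty
  -- for key, value in properties.items(): …
  let clean := properties.foldl (fun clean kv =>
    if clean.contains kv.1 then clean else clean.insert kv.1 kv.2) clean
  clean.items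

-- ===== PORT B =====
def create_clean_properties_structure_py_alt (properties : List (String × String)) : List (String × String) :=
  let P : PySem.Dict String String := PySem.Dict.mk properties
  let ordered : List String :=
    (["density", "meltingPoint", "thermalConductivity", "tensileStrength", "hardness", "youngsModulus"] : List String).foldl
      (fun ordered prop =>
        if P.contains prop then
          (["Unit", "Range", "Percentile"] : List String).foldl (fun ordered suffix =>
            if P.contains (prop ++ suffix) then ordered ++ [prop ++ suffix] else ordered)
            (ordered ++ [prop])
        else ordered) []
  let priority : PySem.Dict String Int :=
    (PySem.List.enumerate ordered).foldl (fun d ik => d.insert ik.2 ik.1) PySem.Dict.empty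
  let fallback : Int := (priority.size : Int)
  let items := PySem.List.sorted properties (fun kv => priority.getD kv.1 fallback) false
  (PySem.Dict.ofList items).items

-- ===== PRECONDITION & SPEC =====
-- Pre_ excludes association lists with duplicate keys: they cannot arise from A's Python dict
-- argument (a dict's keys are unique), so the claim covers every input A actually receives.
def Pre_create_clean_properties_structure_py (properties : List (String × String)) : Prop :=
  (properties.map Prod.fst).Nodup
instance (properties : List (String × String)) : Decidable (Pre_create_clean_properties_structure_py properties) := by
  unfold Pre_create_clean_properties_structure_py; infer_instance
def pvWitness_create_clean_properties_structure_py : (List (String × String)) :=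
  [("hardness", "5"), ("foo", "1"), ("density", "2.7"), ("densityUnit", "g/cm3")]
def Spec_create_clean_properties_structure_py (properties : List (String × String)) (out : List (String × String)) : Prop := out = create_clean_properties_structure_py_alt properties
instance (properties : List (String × String)) (out : List (String × String)) : Decidable (Spec_create_clean_properties_structure_py properties out) := by unfold Spec_create_clean_properties_structure_py; infer_instance

-- ===== CLAIM (what is proved, stated in full; the proofs are below) =====
def Claim_equal_create_clean_properties_structure_py : Prop := ∀ (properties : List (String × String)), Dom_create_clean_properties_structure_py properties → Pre_create_clean_properties_structure_py properties → Spec_create_clean_properties_structure_py properties (create_clean_properties_structure_py properties)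

-- ===== LEMMAS AND PROOFS =====

-- Abbreviations used only by the proofs.
def pvDict (properties : List (String × String)) : PySem.Dict String String := PySem.Dict.mk properties

def pvVal (properties : List (String × String)) (k : String) : String := (pvDict properties).getD k ""

def pvGroups : List String :=
  ["density", "meltingPoint", "thermalConductivity", "tensileStrength", "hardness", "youngsModulus"]

def pvSuffixes : List String := ["Unit", "Range", "Percentile"]

-- the ordered key list both versions are organised around
def pvOkeys (properties : List (String × String)) : List String :=
  pvGroups.foldl (fun ordered prop =>
    if (pvDict properties).contains prop then
      pvSuffixes.foldl (fun ordered suffix =>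
        if (pvDict properties).contains (prop ++ suffix) then ordered ++ [prop ++ suffix] else ordered)
        (ordered ++ [prop])
    else ordered) []

-- insert the keys ks (with their values) into the empty dict
def pvInsertAll (properties : List (String × String)) (ks : List String) : PySem.Dict String String :=
  ks.foldl (fun c k => c.insert k (pvVal properties k)) PySem.Dict.empty

def pvPriority (properties : List (String × String)) : PySem.Dict String Int :=
  (PySem.List.enumerate (pvOkeys properties)).foldl (fun d ik => d.insert ik.2 ik.1) PySem.Dict.empty

def pvRank (properties : List (String × String)) (kv : String × String) : Int :=
  (pvPriority properties).getD kv.1 ((pvOkeys properties).length : Int)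

-- the common normal form: grouped keys first (first match from properties), then the leftovers
def pvFront (properties l : List (String × String)) : List (String × String) :=
  (pvOkeys properties).filterMap (fun k => l.find? (fun kv => kv.1 == k))

def pvTarget (properties l : List (String × String)) : List (String × String) :=
  pvFront properties l ++ l.filter (fun kv => !(decide (kv.1 ∈ pvOkeys properties)))

theorem pvInnerShape (cont : String → Bool) (p : String) (ss : List String) :
    ∀ (acc : List String),
    ss.foldl (fun a s => if cont (p ++ s) then a ++ [p ++ s] else a) acc
      = acc ++ (ss.filter (fun s => cont (p ++ s))).map (fun s => p ++ s) := by
  induction ss with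
  | nil => intro acc; simp
  | cons s ss ih =>
    intro acc
    by_cases h : cont (p ++ s) = true
    · simp [List.foldl_cons, h, ih]
    · simp only [Bool.not_eq_true] at h
      simp [List.foldl_cons, h, ih]

theorem pvOuterShape (cont : String → Bool) (gs : List String) :
    ∀ (acc : List String),
    gs.foldl (fun a p => if cont p then
        pvSuffixes.foldl (fun a s => if cont (p ++ s) then a ++ [p ++ s] else a) (a ++ [p])
      else a) acc
      = acc ++ gs.flatMap (fun p => if cont p then
          p :: (pvSuffixes.filter (fun s => cont (p ++ s))).map (fun s => p ++ s) else []) := by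
  induction gs with
  | nil => intro acc; simp
  | cons p gs ih =>
    intro acc
    by_cases h : cont p = true
    · rw [List.foldl_cons]
      simp only [h, if_true]
      rw [pvInnerShape, ih]
      simp [List.flatMap_cons, h]
    · simp only [Bool.not_eq_true] at h
      simp [List.foldl_cons, h, ih]

theorem pvOkeys_eq_flatMap (properties : List (String × String)) :
    pvOkeys properties = pvGroups.flatMap (fun p => if (pvDict properties).contains p then
      p :: (pvSuffixes.filter (fun s => (pvDict properties).contains (p ++ s))).map (fun s => p ++ s) else []) := by
  unfold pvOkeys
  rw [pvOuterShape]
  simp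

theorem pvOkeys_sublist (properties : List (String × String)) :
    (pvOkeys properties).Sublist (pvGroups.flatMap (fun p => p :: pvSuffixes.map (fun s => p ++ s))) := by
  rw [pvOkeys_eq_flatMap]
  apply List.Sublist.flatMap_right
  intro p hp
  by_cases h : (pvDict properties).contains p = true
  · simp only [h, if_true]
    exact List.Sublist.cons₂ p (List.Sublist.map _ List.filter_sublist)
  · simp only [Bool.not_eq_true] at h
    simp [h]

theorem pvOkeys_nodup (properties : List (String × String)) : (pvOkeys properties).Nodup := by
  have h := pvOkeys_sublist properties
  exact h.nodup (by decide)

theorem pvOkeys_contains (properties : List (String × String)) :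
    ∀ k ∈ pvOkeys properties, (pvDict properties).contains k = true := by
  rw [pvOkeys_eq_flatMap]
  intro k hk
  simp only [List.mem_flatMap] at hk
  obtain ⟨p, hp, hkp⟩ := hk
  by_cases h : (pvDict properties).contains p = true
  · simp only [h, if_true, List.mem_cons, List.mem_map, List.mem_filter] at hkp
    rcases hkp with rfl | ⟨s, ⟨hs, hc⟩, rfl⟩
    · exact h
    · exact hc
  · simp only [Bool.not_eq_true] at h
    simp [h] at hkp

-- ----- A side -----

theorem pvInsertAll_append_singleton (properties : List (String × String)) (acc : List String) (k : String) :
    pvInsertAll properties (acc ++ [k]) = (pvInsertAll properties acc).insert k ((pvDict properties).getD k "") := by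
  simp [pvInsertAll, pvVal]

theorem pvAInner (properties : List (String × String)) (p : String) (ss : List String) :
    ∀ (acc : List String),
    ss.foldl (fun c s => if (pvDict properties).contains (p ++ s) then
        c.insert (p ++ s) ((pvDict properties).getD (p ++ s) "") else c) (pvInsertAll properties acc)
      = pvInsertAll properties (ss.foldl (fun a s =>
          if (pvDict properties).contains (p ++ s) then a ++ [p ++ s] else a) acc) := by
  induction ss with
  | nil => intro acc; simp
  | cons s ss ih =>
    intro acc
    by_cases h : (pvDict properties).contains (p ++ s) = true
    · rw [List.foldl_cons, List.foldl_cons]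
      simp only [h, if_true]
      rw [← pvInsertAll_append_singleton, ih]
    · simp only [Bool.not_eq_true] at h
      simp only [List.foldl_cons, h, Bool.false_eq_true, if_false]
      exact ih acc

theorem pvA_group_loop (properties : List (String × String)) :
    (pvGroups.foldl (fun clean prop =>
      if (pvDict properties).contains prop then
        pvSuffixes.foldl (fun clean suffix =>
          if (pvDict properties).contains (prop ++ suffix) then
            clean.insert (prop ++ suffix) ((pvDict properties).getD (prop ++ suffix) "")
          else clean) (clean.insert prop ((pvDict properties).getD prop ""))
      else clean) PySem.Dict.empty)
    = pvInsertAll properties (pvOkeys properties) := by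
  unfold pvOkeys
  have main : ∀ (gs : List String) (acc : List String),
      gs.foldl (fun clean prop =>
        if (pvDict properties).contains prop then
          pvSuffixes.foldl (fun clean suffix =>
            if (pvDict properties).contains (prop ++ suffix) then
              clean.insert (prop ++ suffix) ((pvDict properties).getD (prop ++ suffix) "")
            else clean) (clean.insert prop ((pvDict properties).getD prop ""))
        else clean) (pvInsertAll properties acc)
      = pvInsertAll properties (gs.foldl (fun a prop =>
          if (pvDict properties).contains prop then
            pvSuffixes.foldl (fun a suffix =>
              if (pvDict properties).contains (prop ++ suffix) then a ++ [prop ++ suffix] else a)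
              (a ++ [prop])
          else a) acc) := by
    intro gs
    induction gs with
    | nil => intro acc; simp
    | cons p gs ih =>
      intro acc
      by_cases h : (pvDict properties).contains p = true
      · rw [List.foldl_cons, List.foldl_cons]
        simp only [h, if_true]
        rw [← pvInsertAll_append_singleton, pvAInner, ih]
      · simp only [Bool.not_eq_true] at h
        simp only [List.foldl_cons, h, Bool.false_eq_true, if_false]
        exact ih acc
  exact main pvGroups []

theorem pvInsertAll_items (properties : List (String × String)) :
    (pvInsertAll properties (pvOkeys properties)).items
      = (pvOkeys properties).map (fun k => (k, pvVal properties k)) := by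
  unfold pvInsertAll
  have h := PySem.Dict.items_foldl_insert_fresh (pvOkeys properties) (fun k => k)
    (fun k => pvVal properties k) PySem.Dict.empty
    (by intro a _; simp [PySem.Dict.contains_empty]) (by simpa using pvOkeys_nodup properties)
  simpa using h

theorem pvInsertAll_contains (properties : List (String × String)) (k : String) :
    (pvInsertAll properties (pvOkeys properties)).contains k = decide (k ∈ pvOkeys properties) := by
  have hkeys : (pvInsertAll properties (pvOkeys properties)).keys = PySem.Set.ofList (pvOkeys properties) := by
    unfold pvInsertAll
    rw [PySem.Dict.keys_foldl_insert (pvOkeys properties) (fun _ k => pvVal properties k) PySem.Dict.empty]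
    simp [PySem.Dict.keys_empty, PySem.Set.update_nil_left]
  by_cases h : k ∈ pvOkeys properties
  · simp only [h, decide_true]
    exact (PySem.Dict.contains_iff_mem_keys _ _).mpr (by rw [hkeys]; exact (PySem.Set.mem_ofList _ _).mpr h)
  · simp only [h, decide_false]
    rw [← Bool.not_eq_true]
    intro hc
    exact h ((PySem.Set.mem_ofList _ _).mp (by rw [← hkeys]; exact (PySem.Dict.contains_iff_mem_keys _ _).mp hc))

theorem pvRemaining (l : List (String × String)) (d : PySem.Dict String String)
    (h : (l.map Prod.fst).Nodup) :
    (l.foldl (fun c kv => if c.contains kv.1 then c else c.insert kv.1 kv.2) d).items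
      = d.items ++ l.filter (fun kv => !(d.contains kv.1)) := by
  induction l generalizing d with
  | nil => simp
  | cons kv l ih =>
    simp only [List.map_cons, List.nodup_cons] at h
    by_cases hc : d.contains kv.1 = true
    · simp only [List.foldl_cons, hc, if_true, List.filter_cons, Bool.not_true, Bool.false_eq_true,
        if_false]
      exact ih d h.2
    · simp only [Bool.not_eq_true] at hc
      simp only [List.foldl_cons, hc, Bool.false_eq_true, if_false, List.filter_cons, Bool.not_false,
        if_true]
      rw [ih _ h.2, PySem.Dict.items_insert_of_not_contains _ _ hc]
      rw [List.filter_congr (l := l) (q := fun x => !d.contains x.1) (fun x hx => by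
        have hne : x.1 ≠ kv.1 := fun he => h.1 (he ▸ List.mem_map_of_mem hx)
        rw [PySem.Dict.contains_insert]
        simp [hne])]
      simp

theorem pvFind_of_contains (properties : List (String × String)) (k : String)
    (h : (pvDict properties).contains k = true) :
    properties.find? (fun kv => kv.1 == k) = some (k, pvVal properties k) := by
  rw [PySem.Dict.contains_eq_isSome_get?] at h
  obtain ⟨v, hv⟩ := Option.isSome_iff_exists.mp h
  have hg : (pvDict properties).get? k = (properties.find? (fun kv => kv.1 == k)).map (fun r => r.2) := rfl
  rw [hg] at hv
  obtain ⟨r, hr, hr2⟩ := Option.map_eq_some_iff.mp hv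
  have hk : r.1 = k := by
    have := List.find?_some hr
    simpa using this
  have hval : pvVal properties k = v := by
    simp [pvVal, PySem.Dict.getD_eq_get?_getD, hg, hr, hr2]
  rw [hr, hval]
  rw [← hk, ← hr2]

theorem pvA_eq_target (properties : List (String × String))
    (h : (properties.map Prod.fst).Nodup) :
    create_clean_properties_structure_py properties = pvTarget properties properties := by
  simp only [create_clean_properties_structure_py]
  rw [show PySem.Dict.mk properties = pvDict properties from rfl]
  rw [show (["Unit", "Range", "Percentile"] : List String) = pvSuffixes from rfl,
    show (["density", "meltingPoint", "thermalConductivity", "tensileStrength", "hardness",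
      "youngsModulus"] : List String) = pvGroups from rfl]
  rw [pvA_group_loop]
  rw [pvRemaining _ _ h, pvInsertAll_items]
  unfold pvTarget pvFront
  rw [List.filter_congr (q := fun kv => !(decide (kv.1 ∈ pvOkeys properties)))
    (fun x _ => by rw [pvInsertAll_contains])]
  rw [List.filterMap_congr (fun k hk => (pvFind_of_contains _ _ (pvOkeys_contains _ k hk)))]
  simp

-- ----- B side -----

theorem pvPriority_items (properties : List (String × String)) :
    (pvPriority properties).items
      = (PySem.List.enumerate (pvOkeys properties)).map (fun a => (a.2, a.1)) := by
  unfold pvPriority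
  have h := PySem.Dict.items_foldl_insert_fresh (PySem.List.enumerate (pvOkeys properties))
    (fun a => a.2) (fun a => a.1) PySem.Dict.empty
    (by intro a _; simp [PySem.Dict.contains_empty])
    (by rw [PySem.List.map_snd_enumerate]; exact pvOkeys_nodup properties)
  simpa using h

theorem pvPriority_keys (properties : List (String × String)) :
    (pvPriority properties).keys = pvOkeys properties := by
  show (pvPriority properties).items.map Prod.fst = _
  rw [pvPriority_items]
  rw [List.map_map]
  exact PySem.List.map_snd_enumerate _ _

theorem pvRank_of_mem (properties : List (String × String)) (kv : String × String)
    (h : kv.1 ∈ pvOkeys properties) :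
    pvRank properties kv = ((pvOkeys properties).idxOf kv.1 : Int) := by
  have hj : (pvOkeys properties).idxOf kv.1 < (pvOkeys properties).length :=
    List.idxOf_lt_length_of_mem h
  have hmem : (kv.1, ((pvOkeys properties).idxOf kv.1 : Int)) ∈ (pvPriority properties).items := by
    rw [pvPriority_items]
    refine List.mem_map.mpr ⟨((((pvOkeys properties).idxOf kv.1 : Nat) : Int), kv.1), ?_, rfl⟩
    rw [PySem.List.mem_enumerate_iff]
    exact ⟨(pvOkeys properties).idxOf kv.1, hj, by simp [List.getElem_idxOf hj]⟩
  have hnd : (pvPriority properties).keys.Nodup := by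
    rw [pvPriority_keys]; exact pvOkeys_nodup properties
  have hget := PySem.Dict.get?_of_mem_items _ hmem hnd
  unfold pvRank
  rw [PySem.Dict.getD_eq_get?_getD, hget]
  rfl

theorem pvRank_of_not_mem (properties : List (String × String)) (kv : String × String)
    (h : kv.1 ∉ pvOkeys properties) :
    pvRank properties kv = ((pvOkeys properties).length : Int) := by
  have hget : (pvPriority properties).get? kv.1 = none := by
    rw [PySem.Dict.get?_eq_none_iff_not_mem_keys, pvPriority_keys]
    exact h
  unfold pvRank
  rw [PySem.Dict.getD_eq_get?_getD, hget]
  rfl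

theorem pvRank_le (properties : List (String × String)) (kv : String × String) :
    pvRank properties kv ≤ ((pvOkeys properties).length : Int) := by
  by_cases h : kv.1 ∈ pvOkeys properties
  · rw [pvRank_of_mem properties kv h]
    exact_mod_cast Nat.le_of_lt (List.idxOf_lt_length_of_mem h)
  · rw [pvRank_of_not_mem properties kv h]

theorem pvInsertBy_middle {α : Type} (before : α → α → Bool) (x : α) (ys zs : List α) (z : α)
    (h1 : ∀ y ∈ ys, before x y = false) (h2 : before x z = true) :
    PySem.List.insertBy before x (ys ++ z :: zs) = ys ++ x :: z :: zs := by
  induction ys with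
  | nil => simp [PySem.List.insertBy, h2]
  | cons y ys ih =>
    have hy : before x y = false := h1 y (List.mem_cons_self)
    simp only [List.cons_append, PySem.List.insertBy, hy, Bool.false_eq_true, if_false]
    rw [ih (fun y hy => h1 y (List.mem_cons_of_mem _ hy))]

theorem pvMem_fst_of_filterMap_find? {t : List String} {l : List (String × String)}
    {y : String × String} (hy : y ∈ t.filterMap (fun k => l.find? (fun kv => kv.1 == k))) :
    y.1 ∈ t := by
  obtain ⟨k, hk, hfind⟩ := List.mem_filterMap.mp hy
  have := List.find?_some hfind
  simp only [beq_iff_eq] at this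
  exact this ▸ hk

theorem pvNotMem_okeys_of_mem_rest {properties l : List (String × String)} {y : String × String}
    (hy : y ∈ l.filter (fun kv => !(decide (kv.1 ∈ pvOkeys properties)))) :
    y.1 ∉ pvOkeys properties := by
  have := List.of_mem_filter hy
  simpa using this

theorem pvSorted_eq_target (properties l : List (String × String))
    (h : (l.map Prod.fst).Nodup) :
    PySem.List.sorted l (pvRank properties) false = pvTarget properties l := by
  rw [PySem.List.sorted_eq_foldl_insertBy]
  induction l using List.reverseRecOn with
  | nil => simp [pvTarget, pvFront]
  | append_singleton q x ih =>
    -- peel the last element off the fold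
    rw [List.foldl_append, List.foldl_cons, List.foldl_nil]
    have hq : (q.map Prod.fst).Nodup := by
      rw [List.map_append] at h
      exact (List.nodup_append.mp h).1
    have hxq : x.1 ∉ q.map Prod.fst := by
      rw [List.map_append] at h
      have hdx := (List.nodup_append.mp h).2.2
      intro hmem
      exact hdx x.1 hmem x.1 (by simp) rfl
    have hfindq : q.find? (fun kv => kv.1 == x.1) = none := by
      rw [List.find?_eq_none]
      intro kv hkv
      simp only [beq_iff_eq]
      intro he
      exact hxq (he ▸ List.mem_map_of_mem hkv)
    rw [ih hq]
    by_cases hx : x.1 ∈ pvOkeys properties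
    · -- x is one of the grouped keys: it lands at its position inside the front part
      obtain ⟨t₁, t₂, hsplit, hnx⟩ := List.eq_append_cons_of_mem hx
      have hnd := pvOkeys_nodup properties
      have hndsp : (t₁ ++ x.1 :: t₂).Nodup := hsplit ▸ hnd
      have hx2 : x.1 ∉ t₂ := by
        have := (List.nodup_append.mp hndsp).2.1
        simp only [List.nodup_cons] at this
        exact this.1
      have hdisj := (List.nodup_append.mp hndsp).2.2
      have hrx : pvRank properties x = (t₁.length : Int) := by
        rw [pvRank_of_mem properties x hx, hsplit, List.idxOf_append_of_notMem hnx]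
        simp
      -- the front part of the target splits at x.1
      have hfront : pvFront properties q
          = t₁.filterMap (fun k => q.find? (fun kv => kv.1 == k))
            ++ t₂.filterMap (fun k => q.find? (fun kv => kv.1 == k)) := by
        unfold pvFront
        rw [hsplit, List.filterMap_append, List.filterMap_cons, hfindq]
      -- ranks on the two sides of the insertion point
      have hlow : ∀ y ∈ t₁.filterMap (fun k => q.find? (fun kv => kv.1 == k)),
          (decide (pvRank properties x < pvRank properties y)) = false := by
        intro y hy
        have hy1 : y.1 ∈ t₁ := pvMem_fst_of_filterMap_find? hy
        have hymem : y.1 ∈ pvOkeys properties := hsplit ▸ List.mem_append_left _ hy1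
        have hr : pvRank properties y = ((t₁.idxOf y.1 : Nat) : Int) := by
          rw [pvRank_of_mem properties y hymem, hsplit, List.idxOf_append_of_mem hy1]
        have hlt : t₁.idxOf y.1 < t₁.length := List.idxOf_lt_length_of_mem hy1
        rw [hr, hrx]
        simp only [decide_eq_false_iff_not, not_lt]
        exact_mod_cast Nat.le_of_lt hlt
      have hhigh : ∀ y ∈ t₂.filterMap (fun k => q.find? (fun kv => kv.1 == k))
            ++ q.filter (fun kv => !(decide (kv.1 ∈ pvOkeys properties))),
          (decide (pvRank properties x < pvRank properties y)) = true := by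
        intro y hy
        rcases List.mem_append.mp hy with hy2 | hyrest
        · have hy1 : y.1 ∈ t₂ := pvMem_fst_of_filterMap_find? hy2
          have hymem : y.1 ∈ pvOkeys properties :=
            hsplit ▸ List.mem_append_right _ (List.mem_cons_of_mem _ hy1)
          have hy1t1 : y.1 ∉ t₁ := fun hc => hdisj y.1 hc y.1 (List.mem_cons_of_mem _ hy1) rfl
          have hyne : y.1 ≠ x.1 := fun he => hx2 (he ▸ hy1)
          have hr : pvRank properties y
              = ((t₁.length + ((x.1 :: t₂).idxOf y.1) : Nat) : Int) := by
            rw [pvRank_of_mem properties y hymem, hsplit, List.idxOf_append_of_notMem hy1t1]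
          have hpos : 0 < (x.1 :: t₂).idxOf y.1 := by
            rw [List.idxOf_cons_ne _ (Ne.symm hyne)]
            omega
          rw [hr, hrx]
          simp only [decide_eq_true_eq]
          exact_mod_cast Nat.lt_add_of_pos_right hpos
        · have hr := pvRank_of_not_mem properties y (pvNotMem_okeys_of_mem_rest hyrest)
          rw [hr, hrx]
          simp only [decide_eq_true_eq]
          have : t₁.length < (pvOkeys properties).length := by
            rw [hsplit, List.length_append, List.length_cons]
            omega
          exact_mod_cast this
      -- perform the insertion
      have hins : PySem.List.insertBy
            (fun a b => decide (pvRank properties a < pvRank properties b)) x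
            (pvTarget properties q)
          = t₁.filterMap (fun k => q.find? (fun kv => kv.1 == k))
            ++ x :: (t₂.filterMap (fun k => q.find? (fun kv => kv.1 == k))
              ++ q.filter (fun kv => !(decide (kv.1 ∈ pvOkeys properties)))) := by
        unfold pvTarget
        rw [hfront, List.append_assoc]
        cases hFL : t₂.filterMap (fun k => q.find? (fun kv => kv.1 == k))
            ++ q.filter (fun kv => !(decide (kv.1 ∈ pvOkeys properties))) with
        | nil =>
          rw [List.append_nil]
          exact PySem.List.insertBy_of_forall_not_before _ _ _ hlow
        | cons z zs =>
          exact pvInsertBy_middle _ x _ zs z hlow (hhigh z (by rw [hFL]; simp))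
      rw [hins]
      -- and identify the result with the target of q ++ [x]
      unfold pvTarget pvFront
      have ht1 : t₁.filterMap (fun k => (q ++ [x]).find? (fun kv => kv.1 == k))
          = t₁.filterMap (fun k => q.find? (fun kv => kv.1 == k)) := by
        apply List.filterMap_congr
        intro k hk
        have hne : x.1 ≠ k := fun he => hnx (he ▸ hk)
        have hone : List.find? (fun kv => kv.1 == k) [x] = none := by
          rw [List.find?_eq_none]
          intro kv hkv
          simp only [List.mem_singleton] at hkv
          subst hkv
          simp [hne]
        rw [List.find?_append, hone, Option.or_none]
      have ht2 : t₂.filterMap (fun k => (q ++ [x]).find? (fun kv => kv.1 == k))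
          = t₂.filterMap (fun k => q.find? (fun kv => kv.1 == k)) := by
        apply List.filterMap_congr
        intro k hk
        have hne : x.1 ≠ k := fun he => hx2 (he ▸ hk)
        have hone : List.find? (fun kv => kv.1 == k) [x] = none := by
          rw [List.find?_eq_none]
          intro kv hkv
          simp only [List.mem_singleton] at hkv
          subst hkv
          simp [hne]
        rw [List.find?_append, hone, Option.or_none]
      have hhead : (q ++ [x]).find? (fun kv => kv.1 == x.1) = some x := by
        rw [List.find?_append, hfindq, Option.none_or]
        exact List.find?_cons_of_pos (by simp)
      have hrest : (q ++ [x]).filter (fun kv => !(decide (kv.1 ∈ pvOkeys properties)))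
          = q.filter (fun kv => !(decide (kv.1 ∈ pvOkeys properties))) := by
        rw [List.filter_append]
        simp [hx]
      rw [hrest, hsplit, List.filterMap_append, List.filterMap_cons, hhead, ht1, ht2]
      simp
    · -- x is a leftover key: it goes to the very end
      have hrx := pvRank_of_not_mem properties x hx
      have hall : ∀ y ∈ pvTarget properties q,
          (decide (pvRank properties x < pvRank properties y)) = false := by
        intro y _
        rw [hrx]
        simp only [decide_eq_false_iff_not, not_lt]
        exact pvRank_le properties y
      rw [PySem.List.insertBy_of_forall_not_before _ _ _ hall]
      unfold pvTarget pvFront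
      have hfr : (pvOkeys properties).filterMap (fun k => (q ++ [x]).find? (fun kv => kv.1 == k))
          = (pvOkeys properties).filterMap (fun k => q.find? (fun kv => kv.1 == k)) := by
        apply List.filterMap_congr
        intro k hk
        have hne : x.1 ≠ k := fun he => hx (he ▸ hk)
        have hone : List.find? (fun kv => kv.1 == k) [x] = none := by
          rw [List.find?_eq_none]
          intro kv hkv
          simp only [List.mem_singleton] at hkv
          subst hkv
          simp [hne]
        rw [List.find?_append, hone, Option.or_none]
      have hrest : (q ++ [x]).filter (fun kv => !(decide (kv.1 ∈ pvOkeys properties)))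
          = q.filter (fun kv => !(decide (kv.1 ∈ pvOkeys properties))) ++ [x] := by
        rw [List.filter_append]
        simp [hx]
      rw [hfr, hrest]
      simp

theorem pvPriority_size (properties : List (String × String)) :
    (pvPriority properties).size = (pvOkeys properties).length := by
  show (pvPriority properties).items.length = _
  rw [pvPriority_items]
  rw [List.length_map, PySem.List.length_enumerate]

theorem pvOfList_items (l : List (String × String)) (h : (l.map Prod.fst).Nodup) :
    (PySem.Dict.ofList l).items = l := by
  have hfresh := PySem.Dict.items_foldl_insert_fresh l Prod.fst Prod.snd
    (PySem.Dict.empty : PySem.Dict String String)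
    (by intro a _; simp [PySem.Dict.contains_empty]) h
  simpa using hfresh

theorem pvB_eq_target (properties : List (String × String))
    (h : (properties.map Prod.fst).Nodup) :
    create_clean_properties_structure_py_alt properties = pvTarget properties properties := by
  have hdef : create_clean_properties_structure_py_alt properties
      = (PySem.Dict.ofList (PySem.List.sorted properties
          (fun kv => (pvPriority properties).getD kv.1 ((pvPriority properties).size : Int))
          false)).items := rfl
  rw [hdef]
  have hkey : (fun kv : String × String =>
      (pvPriority properties).getD kv.1 ((pvPriority properties).size : Int)) = pvRank properties := by
    funext kv
    rw [pvPriority_size]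
    rfl
  rw [hkey]
  have hnd2 : ((PySem.List.sorted properties (pvRank properties) false).map Prod.fst).Nodup :=
    ((PySem.List.sorted_perm properties (pvRank properties) false).map Prod.fst).nodup_iff.mpr h
  rw [pvOfList_items _ hnd2, pvSorted_eq_target properties properties h]

-- ===== VERDICT (by name: the statement is the Claim_ definition above) =====
theorem create_clean_properties_structure_py_spec : Claim_equal_create_clean_properties_structure_py := by
  intro properties _ hpre
  unfold Spec_create_clean_properties_structure_py
  rw [pvA_eq_target properties hpre, pvB_eq_target properties hpre]
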